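-- pv_equiv track=rewrite | github.com/BAA7/text-vectorization | vectorizers_analysis.py | group_texts_by_tags
-- ===== SOURCE A (Python) =====
-- def group_texts_by_tags(text_tags, tags):
--     res = {}
--     for tag in tags:
--         res[tag] = []
--         for i in range(len(text_tags)):
--             if tag in text_tags[i]:
--                 res[tag].append(i)
--     return res
-- ===== SOURCE B (Python) =====
-- def group_texts_by_tags(text_tags, tags):
--     # Inverted index: one pass over the texts, then one lookup per tag.
--     inv = {}
--     for i, txt in enumerate(text_tags):
--         for tok in dict.fromkeys(txt):
--             inv.setdefault(tok, []).append(i)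
--     return {tag: inv.get(tag, []) for tag in tags}
-- ===== Notes on version B (the rewrite author's own statement) =====
-- stated objective: faster
-- what changed: Replaced A's per-tag rescan of every text (for each tag, loop over all texts) by a single inverted index built in one pass over the texts, from which each tag's index list is a single lookup.
import Mathlib
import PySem

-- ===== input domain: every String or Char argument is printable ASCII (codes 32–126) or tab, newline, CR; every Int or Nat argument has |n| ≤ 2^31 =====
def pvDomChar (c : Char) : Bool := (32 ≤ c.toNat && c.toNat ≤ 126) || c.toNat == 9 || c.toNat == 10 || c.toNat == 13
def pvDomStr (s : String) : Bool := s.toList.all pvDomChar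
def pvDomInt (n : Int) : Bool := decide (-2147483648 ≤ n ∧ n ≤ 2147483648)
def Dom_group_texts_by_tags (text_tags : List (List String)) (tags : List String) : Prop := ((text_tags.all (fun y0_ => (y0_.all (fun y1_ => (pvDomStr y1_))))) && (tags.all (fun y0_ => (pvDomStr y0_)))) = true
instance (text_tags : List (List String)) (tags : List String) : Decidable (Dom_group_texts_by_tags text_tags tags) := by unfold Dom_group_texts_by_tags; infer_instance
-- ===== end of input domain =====

-- B replaces A's per-tag scan over all texts by a single inverted index built in one pass over the texts.

-- ===== PORT A =====
-- for tag in tags: res[tag] = []; for i in range(len(text_tags)): if tag in text_tags[i]: res[tag].append(i)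
def group_texts_by_tags (text_tags : List (List String)) (tags : List String) : List (String × List Int) :=
  (tags.foldl (fun res tag =>
    (PySem.List.pyRange 0 (text_tags.length : Int) 1).foldl
      (fun res i =>
        if tag ∈ PySem.List.pyGetD text_tags i [] then
          res.modify tag [] (fun l => l ++ [i])
        else res)
      (res.insert tag ([] : List Int)))
    (PySem.Dict.empty : PySem.Dict String (List Int))).items

-- ===== PORT B =====
-- inv = {}; for i, txt in enumerate(text_tags): for tok in dict.fromkeys(txt): inv.setdefault(tok, []).append(i)
-- return {tag: inv.get(tag, []) for tag in tags}
def group_texts_by_tags_alt (text_tags : List (List String)) (tags : List String) : List (String × List Int) :=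
  let inv : PySem.Dict String (List Int) :=
    (PySem.List.enumerate text_tags).foldl
      (fun d p => (PySem.List.dedup p.2).foldl (fun d tok => d.modify tok [] (fun l => l ++ [p.1])) d)
      PySem.Dict.empty
  (tags.foldl (fun out tag => out.insert tag (inv.getD tag []))
    (PySem.Dict.empty : PySem.Dict String (List Int))).items

-- ===== PRECONDITION & SPEC =====
def Spec_group_texts_by_tags (text_tags : List (List String)) (tags : List String) (out : List (String × List Int)) : Prop := out = group_texts_by_tags_alt text_tags tags
instance (text_tags : List (List String)) (tags : List String) (out : List (String × List Int)) : Decidable (Spec_group_texts_by_tags text_tags tags out) := by unfold Spec_group_texts_by_tags; infer_instance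

-- ===== CLAIM (what is proved, stated in full; the proofs are below) =====
def Claim_equal_group_texts_by_tags : Prop := ∀ (text_tags : List (List String)) (tags : List String), Dom_group_texts_by_tags text_tags tags → Spec_group_texts_by_tags text_tags tags (group_texts_by_tags text_tags tags)

-- ===== LEMMAS AND PROOFS =====

-- A's inner loop over a fixed key is one insert of the filtered index list.
theorem foldA_inner (tt : List (List String)) (tag : String) (l : List Int)
    (d : PySem.Dict String (List Int)) (acc : List Int) :
    l.foldl (fun res i =>
        if tag ∈ PySem.List.pyGetD tt i [] then res.modify tag [] (fun l => l ++ [i]) else res)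
      (d.insert tag acc)
    = d.insert tag (acc ++ l.filter (fun i => decide (tag ∈ PySem.List.pyGetD tt i []))) := by
  induction l generalizing acc with
  | nil => simp
  | cons i rest ih =>
    simp only [List.foldl_cons]
    by_cases h : tag ∈ PySem.List.pyGetD tt i []
    · rw [if_pos h]
      have hstep : (d.insert tag acc).modify tag [] (fun l => l ++ [i]) = d.insert tag (acc ++ [i]) := by
        simp [PySem.Dict.modify, PySem.Dict.getD_insert_self, PySem.Dict.insert_insert_self]
      rw [hstep, ih]
      simp [h]
    · rw [if_neg h, ih]
      simp [h]

-- on a Nodup token list, pairing with i, filtering on the key and projecting leaves at most one i.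
theorem filter_pairs_nodup (i : Int) (c : String) (l : List String) (hl : l.Nodup) :
    List.map (fun x => x.2) (List.filter (fun p => p.1 == c) (l.map (fun tok => (tok, i))))
    = if c ∈ l then [i] else [] := by
  induction l with
  | nil => simp
  | cons x xs ih =>
    simp only [List.map_cons, List.filter_cons]
    by_cases hx : x = c
    · subst hx
      have hnil : (xs.map (fun tok => (tok, i))).filter (fun p => p.1 == x) = [] := by
        apply List.filter_eq_nil_iff.mpr
        intro p hp
        rcases List.mem_map.mp hp with ⟨tok, htok, rfl⟩
        simp only [beq_iff_eq]
        intro he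
        exact (List.nodup_cons.mp hl).1 (he ▸ htok)
      simp [hnil]
    · have hxs := ih (List.nodup_cons.mp hl).2
      have hcx : ¬ c = x := fun h => hx h.symm
      simp [hx, hcx, hxs]

-- B's per-text inner loop appends the index once to every token of the text.
theorem foldB_text (txt : List String) (i : Int) (d : PySem.Dict String (List Int)) (c : String) :
    ((PySem.List.dedup txt).foldl (fun d tok => d.modify tok [] (fun l => l ++ [i])) d).getD c []
    = d.getD c [] ++ (if c ∈ txt then [i] else []) := by
  have h1 : (PySem.List.dedup txt).foldl (fun d tok => d.modify tok [] (fun l => l ++ [i])) d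
      = ((PySem.List.dedup txt).map (fun tok => (tok, i))).foldl
          (fun d p => d.modify p.1 [] (fun l => l ++ [p.2])) d := by
    rw [List.foldl_map]
  rw [h1, PySem.Dict.getD_foldl_modify_append,
      filter_pairs_nodup i c _ (PySem.List.nodup_dedup txt)]
  simp

-- getD of B's whole inverted-index fold.
theorem foldB_inv (tt : List (List String)) (s : Int) (d : PySem.Dict String (List Int)) (c : String) :
    ((PySem.List.enumerate tt s).foldl
        (fun d p => (PySem.List.dedup p.2).foldl (fun d tok => d.modify tok [] (fun l => l ++ [p.1])) d)
        d).getD c []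
    = d.getD c [] ++ ((PySem.List.enumerate tt s).filter (fun p => decide (c ∈ p.2))).map (·.1) := by
  induction tt generalizing s d with
  | nil => simp [PySem.List.enumerate]
  | cons txt rest ih =>
    rw [PySem.List.enumerate_cons]
    simp only [List.foldl_cons, List.filter_cons]
    rw [ih, foldB_text]
    by_cases h : c ∈ txt
    · simp [h, List.append_assoc]
    · simp [h]

-- appending one text to the enumeration.
theorem enumerate_concat (y : List String) (l : List (List String)) (s : Int) :
    PySem.List.enumerate (l ++ [y]) s = PySem.List.enumerate l s ++ [(s + l.length, y)] := by
  induction l generalizing s with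
  | nil => simp [PySem.List.enumerate_cons, PySem.List.enumerate]
  | cons x xs ihx =>
    rw [List.cons_append, PySem.List.enumerate_cons, PySem.List.enumerate_cons, ihx]
    simp only [List.cons_append, List.length_cons]
    push_cast
    ring_nf

-- the two index lists agree: positional scan over range(len) = enumerate-based scan.
theorem index_lists_eq (tt : List (List String)) (tag : String) :
    ((PySem.List.enumerate tt 0).filter (fun p => decide (tag ∈ p.2))).map (·.1)
    = (PySem.List.pyRange 0 (tt.length : Int) 1).filter
        (fun i => decide (tag ∈ PySem.List.pyGetD tt i [])) := by
  induction tt using List.reverseRecOn with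
  | nil => simp [PySem.List.enumerate]
  | append_singleton ys y ih =>
    have henum := enumerate_concat y ys 0
    rw [zero_add] at henum
    have hrange : PySem.List.pyRange 0 ((ys ++ [y]).length : Int) 1
        = PySem.List.pyRange 0 (ys.length : Int) 1 ++ [(ys.length : Int)] := by
      rw [List.length_append]
      push_cast
      exact PySem.List.pyRange_one_succ_right (by omega)
    rw [henum, hrange, List.filter_append, List.filter_append, List.map_append]
    congr 1
    · rw [ih]
      apply List.filter_congr
      intro i hi
      have hb := PySem.List.mem_pyRange_one.mp hi
      have hget : PySem.List.pyGetD (ys ++ [y]) i [] = PySem.List.pyGetD ys i [] := by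
        rw [PySem.List.pyGetD_eq_getElem _ _ hb.1 (by simp; omega),
            PySem.List.pyGetD_eq_getElem _ _ hb.1 hb.2]
        rw [List.getElem_append_left]
      rw [hget]
    · have hget : PySem.List.pyGetD (ys ++ [y]) (ys.length : Int) [] = y := by
        rw [PySem.List.pyGetD_eq_getElem _ _ (by omega) (by simp)]
        simp
      by_cases h : tag ∈ y
      · simp [hget, h]
      · simp [hget, h]

-- ===== VERDICT (by name: the statement is the Claim_ definition above) =====
theorem group_texts_by_tags_spec : Claim_equal_group_texts_by_tags := by
  intro text_tags tags _
  unfold Spec_group_texts_by_tags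
  simp only [group_texts_by_tags, group_texts_by_tags_alt]
  have hfun : (fun (res : PySem.Dict String (List Int)) (tag : String) =>
      (PySem.List.pyRange 0 (text_tags.length : Int) 1).foldl
        (fun res i =>
          if tag ∈ PySem.List.pyGetD text_tags i [] then res.modify tag [] (fun l => l ++ [i]) else res)
        (res.insert tag ([] : List Int)))
      = (fun (out : PySem.Dict String (List Int)) (tag : String) =>
          out.insert tag
            (((PySem.List.enumerate text_tags).foldl
                (fun d p => (PySem.List.dedup p.2).foldl
                  (fun d tok => d.modify tok [] (fun l => l ++ [p.1])) d)
                PySem.Dict.empty).getD tag [])) := by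
    funext res tag
    rw [foldA_inner, foldB_inv, PySem.Dict.getD_empty, List.nil_append, List.nil_append,
        index_lists_eq]
  rw [hfun]
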